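-- pv_equiv track=rewrite | github.com/caelan/pddlstream | examples/pybullet/construction/utils.py | get_element_neighbors
-- ===== SOURCE A (Python) =====
-- from collections import defaultdict, namedtuple
--
-- def get_node_neighbors(elements):
--     node_neighbors = defaultdict(set)
--     for e in elements:
--         n1, n2 = e
--         node_neighbors[n1].add(e)
--         node_neighbors[n2].add(e)
--     return node_neighbors
--
-- def get_element_neighbors(element_bodies):
--     node_neighbors = get_node_neighbors(element_bodies)
--     element_neighbors = defaultdict(set)
--     for e in element_bodies:
--         n1, n2 = e
--         element_neighbors[e].update(node_neighbors[n1])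
--         element_neighbors[e].update(node_neighbors[n2])
--         element_neighbors[e].remove(e)
--     return element_neighbors
-- ===== SOURCE B (Python) =====
-- # Alternative: no node_neighbors index; each element's neighbor set is built by
-- # direct pairwise scans over the element list (one scan per endpoint).
-- def get_element_neighbors(element_bodies):
--     element_neighbors = {}
--     for e in element_bodies:
--         n1, n2 = e
--         s = set()
--         for f in element_bodies:
--             f1, f2 = f
--             if (f1 == n1 or f2 == n1) and f != e:
--                 s.add(f)
--         for f in element_bodies:
--             f1, f2 = f
--             if (f1 == n2 or f2 == n2) and f != e:
--                 s.add(f)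
--         element_neighbors[e] = s
--     return element_neighbors
-- ===== Notes on version B (the rewrite author's own statement) =====
-- stated objective: alternative
-- what changed: B drops A's node->elements index (defaultdict of sets) entirely and computes each element's neighbor set by two direct scans over the element list (one per endpoint), inserting into a plain dict; same exact keys, sets and insertion order.
import Mathlib
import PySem

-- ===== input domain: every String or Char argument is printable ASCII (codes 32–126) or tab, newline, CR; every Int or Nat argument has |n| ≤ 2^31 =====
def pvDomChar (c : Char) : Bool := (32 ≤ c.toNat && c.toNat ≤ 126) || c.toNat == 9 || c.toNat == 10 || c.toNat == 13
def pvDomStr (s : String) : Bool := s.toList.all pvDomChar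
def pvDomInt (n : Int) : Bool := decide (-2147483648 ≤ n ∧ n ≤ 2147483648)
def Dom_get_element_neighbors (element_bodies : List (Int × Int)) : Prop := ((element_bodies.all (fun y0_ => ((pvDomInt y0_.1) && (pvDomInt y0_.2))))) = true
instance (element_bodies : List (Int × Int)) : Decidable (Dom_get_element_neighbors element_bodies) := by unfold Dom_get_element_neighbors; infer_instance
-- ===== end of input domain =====

-- B replaces A's node->elements index with direct pairwise scans over the element
-- list (one scan per endpoint of each element): an alternative decomposition, not faster.

-- ===== PORT A =====
def get_node_neighbors (elements : List (Int × Int)) : PySem.Dict Int (PySem.Set (Int × Int)) :=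
  elements.foldl (fun d e =>
    (d.modify e.1 [] (fun s => PySem.Set.add s e)).modify e.2 [] (fun s => PySem.Set.add s e))
    PySem.Dict.empty

def get_element_neighbors (element_bodies : List (Int × Int)) : List (Int × Int × List (Int × Int)) :=
  let node_neighbors := get_node_neighbors element_bodies
  let element_neighbors : PySem.Dict (Int × Int) (PySem.Set (Int × Int)) :=
    element_bodies.foldl (fun d e =>
      -- .remove(e): e is always a member here (e ∈ node_neighbors[e.1]), so the
      -- KeyError branch of remove is unreachable and discard is exact.
      PySem.Dict.modify
        (PySem.Dict.modify
          (PySem.Dict.modify d e [] (fun s => PySem.Set.update s (node_neighbors.getD e.1 [])))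
          e [] (fun s => PySem.Set.update s (node_neighbors.getD e.2 [])))
        e [] (fun s => PySem.Set.discard s e))
      PySem.Dict.empty
  element_neighbors.items.map (fun p => (p.1.1, p.1.2, p.2))

-- ===== PORT B =====
def get_element_neighbors_alt (element_bodies : List (Int × Int)) : List (Int × Int × List (Int × Int)) :=
  let element_neighbors : PySem.Dict (Int × Int) (PySem.Set (Int × Int)) :=
    element_bodies.foldl (fun d e =>
      let s1 := element_bodies.foldl (fun s f =>
        if (f.1 == e.1 || f.2 == e.1) && !(f == e) then PySem.Set.add s f else s) PySem.Set.empty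
      let s2 := element_bodies.foldl (fun s f =>
        if (f.1 == e.2 || f.2 == e.2) && !(f == e) then PySem.Set.add s f else s) s1
      d.insert e s2) PySem.Dict.empty
  element_neighbors.items.map (fun p => (p.1.1, p.1.2, p.2))

-- ===== PRECONDITION & SPEC =====
def Spec_get_element_neighbors (element_bodies : List (Int × Int)) (out : List (Int × Int × List (Int × Int))) : Prop := out = get_element_neighbors_alt element_bodies
instance (element_bodies : List (Int × Int)) (out : List (Int × Int × List (Int × Int))) : Decidable (Spec_get_element_neighbors element_bodies out) := by unfold Spec_get_element_neighbors; infer_instance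

-- ===== CLAIM (what is proved, stated in full; the proofs are below) =====
def Claim_equal_get_element_neighbors : Prop := ∀ (element_bodies : List (Int × Int)), Dom_get_element_neighbors element_bodies → Spec_get_element_neighbors element_bodies (get_element_neighbors element_bodies)

-- ===== LEMMAS AND PROOFS =====
-- helper defs
def pvQ (n : Int) (f : Int × Int) : Bool := f.1 == n || f.2 == n
def pvNeq (e f : Int × Int) : Bool := !(f == e)
def pvVal (el : List (Int × Int)) (e : Int × Int) : PySem.Set (Int × Int) :=
  PySem.Set.ofList ((el.filter (pvQ e.1)).filter (pvNeq e) ++ (el.filter (pvQ e.2)).filter (pvNeq e))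

-- dedup commutes with filter
theorem pv_filter_ofList {α : Type} [BEq α] [LawfulBEq α] (p : α → Bool) (l : List α) :
    (PySem.Set.ofList l).filter p = PySem.Set.ofList (l.filter p) := by
  induction l using List.reverseRecOn with
  | nil => rfl
  | append_singleton xs x ih =>
    rw [PySem.Set.ofList_append_singleton, List.filter_append, PySem.Set.add_eq_ite]
    by_cases hx : x ∈ PySem.Set.ofList xs
    · rw [if_pos hx]
      by_cases hp : p x = true
      · have hx' : x ∈ PySem.Set.ofList (xs.filter p) := by
          rw [PySem.Set.mem_ofList] at hx ⊢
          exact List.mem_filter.mpr ⟨hx, hp⟩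
        simp [hp, ih, PySem.Set.ofList_append_singleton, PySem.Set.add_of_mem hx']
      · simp [hp, ih]
    · rw [if_neg hx, List.filter_append, ih]
      by_cases hp : p x = true
      · have hx' : x ∉ PySem.Set.ofList (xs.filter p) := by
          rw [PySem.Set.mem_ofList] at hx ⊢
          exact fun h => hx (List.mem_filter.mp h).1
        simp [hp, PySem.Set.ofList_append_singleton,
          PySem.Set.add_of_not_mem hx']
      · simp [hp]

theorem pv_discard_ofList {α : Type} [BEq α] [LawfulBEq α] (l : List α) (a : α) :
    PySem.Set.discard (PySem.Set.ofList l) a = PySem.Set.ofList (l.filter (fun x => !(x == a))) := by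
  rw [PySem.Set.discard, pv_filter_ofList]

theorem pv_update_ofList_right {α : Type} [BEq α] [LawfulBEq α] (s : PySem.Set α) (b : List α) :
    PySem.Set.update s (PySem.Set.ofList b) = PySem.Set.update s b := by
  induction b using List.reverseRecOn generalizing s with
  | nil => rfl
  | append_singleton xs x ih =>
    rw [PySem.Set.ofList_append_singleton, PySem.Set.add_eq_ite]
    by_cases hx : x ∈ PySem.Set.ofList xs
    · rw [if_pos hx, ih, PySem.Set.update_append]
      have hx' : x ∈ PySem.Set.update s xs :=
        (PySem.Set.mem_update _ _ _).mpr (Or.inr ((PySem.Set.mem_ofList _ _).mp hx))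
      simp [PySem.Set.update_cons, PySem.Set.update_nil, PySem.Set.add_of_mem hx']
    · rw [if_neg hx, PySem.Set.update_append, PySem.Set.update_append, ih]

theorem pv_nn_fold (l : List (Int × Int)) (d : PySem.Dict Int (PySem.Set (Int × Int))) (n : Int) :
    ((l.foldl (fun d e =>
      (d.modify e.1 [] (fun s => PySem.Set.add s e)).modify e.2 [] (fun s => PySem.Set.add s e)) d).getD n [])
    = PySem.Set.update (d.getD n []) (l.filter (pvQ n)) := by
  induction l generalizing d with
  | nil => rfl
  | cons e t ih =>
    rw [List.foldl_cons, ih, List.filter_cons]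
    have hstep : (((d.modify e.1 [] (fun s => PySem.Set.add s e)).modify e.2 [] (fun s => PySem.Set.add s e)).getD n [])
        = if pvQ n e then PySem.Set.add (d.getD n []) e else d.getD n [] := by
      rw [PySem.Dict.getD_modify, PySem.Dict.getD_modify, PySem.Dict.getD_modify]
      by_cases h2 : n = e.2 <;> by_cases h1 : n = e.1
      · simp [pvQ, ← h1, ← h2]
      · simp [pvQ, ← h2, h1]
      · simp [pvQ, ← h1, h2]
      · have ha : ¬ (e.1 = n) := fun h => h1 h.symm
        have hb : ¬ (e.2 = n) := fun h => h2 h.symm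
        simp [pvQ, h1, h2, ha, hb]
    rw [hstep]
    by_cases hq : pvQ n e
    · rw [if_pos hq, if_pos hq, PySem.Set.update_cons]
    · rw [if_neg hq, if_neg hq]

theorem pv_nn_getD (el : List (Int × Int)) (n : Int) :
    (get_node_neighbors el).getD n [] = PySem.Set.ofList (el.filter (pvQ n)) := by
  rw [get_node_neighbors, pv_nn_fold, PySem.Dict.getD_empty, PySem.Set.update_nil_left]

theorem pv_valB_eq (el : List (Int × Int)) (e : Int × Int) :
    (el.foldl (fun s f =>
        if (f.1 == e.2 || f.2 == e.2) && !(f == e) then PySem.Set.add s f else s)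
      (el.foldl (fun s f =>
        if (f.1 == e.1 || f.2 == e.1) && !(f == e) then PySem.Set.add s f else s) PySem.Set.empty))
    = pvVal el e := by
  rw [PySem.List.foldl_if_eq_foldl_filter, PySem.List.foldl_if_eq_foldl_filter]
  have hf : ∀ n : Int, el.filter (fun f => (f.1 == n || f.2 == n) && !(f == e))
      = (el.filter (pvQ n)).filter (pvNeq e) := by
    intro n; rw [List.filter_filter]
    apply List.filter_congr; intro a _; simp [pvQ, pvNeq, Bool.and_comm]
  rw [hf, hf, pvVal, PySem.Set.ofList_append]; rfl

theorem pv_mem_val (el : List (Int × Int)) (e y : Int × Int) :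
    y ∈ pvVal el e ↔ (y ∈ el ∧ (pvQ e.1 y = true ∨ pvQ e.2 y = true) ∧ y ≠ e) := by
  simp only [pvVal, PySem.Set.mem_ofList, List.mem_append, List.mem_filter, pvNeq,
    Bool.not_eq_eq_eq_not, Bool.not_true, beq_eq_false_iff_ne, ne_eq]
  tauto

theorem pv_hA_nil (el : List (Int × Int)) (e : Int × Int) :
    PySem.Set.discard
      (PySem.Set.update
        (PySem.Set.update ([] : PySem.Set (Int × Int)) ((get_node_neighbors el).getD e.1 []))
        ((get_node_neighbors el).getD e.2 [])) e = pvVal el e := by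
  rw [pv_nn_getD, pv_nn_getD, PySem.Set.update_nil_left, PySem.Set.ofList_ofList,
    pv_update_ofList_right, ← PySem.Set.ofList_append, pv_discard_ofList, pvVal,
    List.filter_append]
  rfl

theorem pv_self_not_mem_val (el : List (Int × Int)) (e : Int × Int) : e ∉ pvVal el e := by
  rw [pv_mem_val]; tauto

theorem pv_hA_idem (el : List (Int × Int)) (e : Int × Int) (he : e ∈ el) :
    PySem.Set.discard
      (PySem.Set.update
        (PySem.Set.update (pvVal el e) ((get_node_neighbors el).getD e.1 []))
        ((get_node_neighbors el).getD e.2 [])) e = pvVal el e := by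
  have heF1 : e ∈ el.filter (pvQ e.1) :=
    List.mem_filter.mpr ⟨he, by simp [pvQ]⟩
  -- first update adds exactly e
  have h1 : PySem.Set.update (pvVal el e) ((get_node_neighbors el).getD e.1 []) = pvVal el e ++ [e] := by
    rw [pv_nn_getD, pv_update_ofList_right, PySem.Set.update_eq_append_filter]
    congr 1
    have hcongr : ∀ y ∈ PySem.Set.ofList (el.filter (pvQ e.1)),
        (!(pvVal el e).contains y) = (y == e) := by
      intro y hy
      rw [PySem.Set.mem_ofList, List.mem_filter] at hy
      by_cases hye : y = e
      · subst hye
        simp [pv_self_not_mem_val]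
      · have : y ∈ pvVal el e := (pv_mem_val el e y).mpr ⟨hy.1, Or.inl hy.2, hye⟩
        simp [PySem.Set.contains_eq_listContains, this, hye]
    rw [List.filter_congr hcongr, List.filter_beq]
    have : List.count e (PySem.Set.ofList (el.filter (pvQ e.1))) = 1 := by
      have hmem : e ∈ PySem.Set.ofList (el.filter (pvQ e.1)) := (PySem.Set.mem_ofList _ _).mpr heF1
      exact List.count_eq_one_of_mem (PySem.Set.nodup_ofList _) hmem
    rw [this, List.replicate_one]
  rw [h1, pv_nn_getD, pv_update_ofList_right, PySem.Set.update_eq_append_filter]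
  have h2 : List.filter (fun y => !(pvVal el e ++ [e]).contains y)
      (PySem.Set.ofList (el.filter (pvQ e.2))) = [] := by
    rw [List.filter_eq_nil_iff]
    intro y hy
    rw [PySem.Set.mem_ofList, List.mem_filter] at hy
    have hmem : y ∈ pvVal el e ++ [e] := by
      by_cases hye : y = e
      · simp [hye]
      · exact List.mem_append.mpr (Or.inl ((pv_mem_val el e y).mpr ⟨hy.1, Or.inr hy.2, hye⟩))
    simp [PySem.Set.contains_eq_listContains, hmem]
  rw [h2, List.append_nil, PySem.Set.discard, List.filter_append]
  have h3 : List.filter (fun y => !y == e) [e] = [] := by simp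
  have h4 : List.filter (fun y => !y == e) (pvVal el e) = pvVal el e := by
    rw [List.filter_eq_self]
    intro a ha
    have : a ≠ e := ((pv_mem_val el e a).mp ha).2.2
    simp [this]
  rw [h3, h4, List.append_nil]

theorem pv_insert_insert {κ ν : Type} [BEq κ] [LawfulBEq κ] (d : PySem.Dict κ ν) (k : κ) (v w : ν) :
    (d.insert k v).insert k w = d.insert k w := by
  apply PySem.Dict.ext
  rw [PySem.Dict.items_insert_of_contains _ _ (PySem.Dict.contains_insert_self d k v)]
  by_cases hc : d.contains k = true
  · rw [PySem.Dict.items_insert_of_contains _ _ hc,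
      PySem.Dict.items_insert_of_contains _ _ hc, List.map_map]
    apply List.map_congr_left
    intro p _
    by_cases hp : (p.1 == k) = true <;> simp [hp]
  · have hc' : d.contains k = false := by simpa using hc
    have hnone : ∀ p ∈ d.items, (p.1 == k) = false := by
      intro p hp
      cases h : (p.1 == k)
      · rfl
      · exact absurd ((PySem.Dict.contains_iff_mem_keys d k).mpr
          ((eq_of_beq h) ▸ PySem.Dict.mem_keys_of_mem_items d hp)) hc
    rw [PySem.Dict.items_insert_of_not_contains _ _ hc',
      PySem.Dict.items_insert_of_not_contains _ _ hc', List.map_append]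
    congr 1
    · conv_rhs => rw [← List.map_id d.items]
      apply List.map_congr_left
      intro p hp
      simp [hnone p hp]
    · simp

theorem pv_stepA_eq (d : PySem.Dict (Int × Int) (PySem.Set (Int × Int))) (e : Int × Int)
    (u1 u2 u3 : PySem.Set (Int × Int) → PySem.Set (Int × Int)) :
    PySem.Dict.modify (PySem.Dict.modify (PySem.Dict.modify d e [] u1) e [] u2) e [] u3
    = d.insert e (u3 (u2 (u1 (d.getD e [])))) := by
  simp only [PySem.Dict.modify, PySem.Dict.getD_insert_self, pv_insert_insert]

theorem pv_fst_map_val {β : Type} (l : List (Int × Int)) (g : (Int × Int) → β) :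
    (l.map (fun e => (e, g e))).map Prod.fst = l := by
  rw [List.map_map]
  have : (Prod.fst ∘ fun e => (e, g e)) = id := funext (fun _ => rfl)
  rw [this, List.map_id]

theorem pv_items_replace_id {β : Type} [DecidableEq β] (l : List (Int × Int)) (x : Int × Int)
    (g : (Int × Int) → β) :
    (l.map (fun e => (e, g e))).map
      (fun p => if (p.1 == x) = true then (x, g x) else p) = l.map (fun e => (e, g e)) := by
  rw [List.map_map]
  apply List.map_congr_left
  intro e _
  by_cases he : e = x
  · subst he; simp
  · simp [he]

theorem pv_dict_insert_items (g : (Int × Int) → PySem.Set (Int × Int)) (l : List (Int × Int)) :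
    (l.foldl (fun d e => d.insert e (g e)) PySem.Dict.empty).items
    = (PySem.Set.ofList l).map (fun e => (e, g e)) := by
  induction l using List.reverseRecOn with
  | nil => rfl
  | append_singleton t x ih =>
    rw [List.foldl_append, List.foldl_cons, List.foldl_nil]
    set D := t.foldl (fun d e => d.insert e (g e)) PySem.Dict.empty with hD
    have hkeys : D.keys = PySem.Set.ofList t := by
      show D.items.map Prod.fst = _
      rw [ih, pv_fst_map_val]
    by_cases hx : x ∈ PySem.Set.ofList t
    · have hc : D.contains x = true := by
        rw [PySem.Dict.contains_iff_mem_keys, hkeys]; exact hx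
      rw [PySem.Dict.items_insert_of_contains _ _ hc, ih, pv_items_replace_id,
        PySem.Set.ofList_append_singleton, PySem.Set.add_of_mem hx]
    · have hc : D.contains x = false := by
        rw [Bool.eq_false_iff]
        intro h
        exact hx (hkeys ▸ (PySem.Dict.contains_iff_mem_keys D x).mp h)
      rw [PySem.Dict.items_insert_of_not_contains _ _ hc, ih,
        PySem.Set.ofList_append_singleton, PySem.Set.add_of_not_mem hx, List.map_append]
      rfl

theorem pv_dictA_items (el : List (Int × Int)) (l : List (Int × Int)) (hsub : ∀ x ∈ l, x ∈ el) :
    (l.foldl (fun d e =>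
      PySem.Dict.modify
        (PySem.Dict.modify
          (PySem.Dict.modify d e [] (fun s => PySem.Set.update s ((get_node_neighbors el).getD e.1 [])))
          e [] (fun s => PySem.Set.update s ((get_node_neighbors el).getD e.2 [])))
        e [] (fun s => PySem.Set.discard s e)) PySem.Dict.empty).items
    = (PySem.Set.ofList l).map (fun e => (e, pvVal el e)) := by
  induction l using List.reverseRecOn with
  | nil => rfl
  | append_singleton t x ih =>
    have hsub' : ∀ y ∈ t, y ∈ el := fun y hy => hsub y (List.mem_append.mpr (Or.inl hy))
    have hxel : x ∈ el := hsub x (List.mem_append.mpr (Or.inr (List.mem_singleton.mpr rfl)))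
    rw [List.foldl_append, List.foldl_cons, List.foldl_nil, pv_stepA_eq]
    have ih' := ih hsub'
    set D := t.foldl (fun d e =>
      PySem.Dict.modify
        (PySem.Dict.modify
          (PySem.Dict.modify d e [] (fun s => PySem.Set.update s ((get_node_neighbors el).getD e.1 [])))
          e [] (fun s => PySem.Set.update s ((get_node_neighbors el).getD e.2 [])))
        e [] (fun s => PySem.Set.discard s e)) PySem.Dict.empty with hD
    have hkeys : D.keys = PySem.Set.ofList t := by
      show D.items.map Prod.fst = _
      rw [ih', pv_fst_map_val]
    have hknd : D.keys.Nodup := by rw [hkeys]; exact PySem.Set.nodup_ofList _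
    by_cases hx : x ∈ PySem.Set.ofList t
    · have hc : D.contains x = true := by
        rw [PySem.Dict.contains_iff_mem_keys, hkeys]; exact hx
      have hgd : D.getD x [] = pvVal el x := by
        apply PySem.Dict.getD_of_mem_items _ _ hknd
        rw [ih']
        exact List.mem_map.mpr ⟨x, hx, rfl⟩
      rw [hgd, pv_hA_idem el x hxel, PySem.Dict.items_insert_of_contains _ _ hc, ih',
        pv_items_replace_id, PySem.Set.ofList_append_singleton, PySem.Set.add_of_mem hx]
    · have hc : D.contains x = false := by
        rw [Bool.eq_false_iff]
        intro h
        exact hx (hkeys ▸ (PySem.Dict.contains_iff_mem_keys D x).mp h)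
      have hgd : D.getD x [] = [] := PySem.Dict.getD_of_not_contains D [] hc
      rw [hgd, pv_hA_nil, PySem.Dict.items_insert_of_not_contains _ _ hc, ih',
        PySem.Set.ofList_append_singleton, PySem.Set.add_of_not_mem hx, List.map_append]
      rfl

theorem pv_main (el : List (Int × Int)) :
    get_element_neighbors el = get_element_neighbors_alt el := by
  simp only [get_element_neighbors, get_element_neighbors_alt]
  congr 1
  rw [pv_dictA_items el el (fun _ h => h)]
  have hB : el.foldl (fun d e =>
      let s1 := el.foldl (fun s f =>
        if (f.1 == e.1 || f.2 == e.1) && !(f == e) then PySem.Set.add s f else s) PySem.Set.empty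
      let s2 := el.foldl (fun s f =>
        if (f.1 == e.2 || f.2 == e.2) && !(f == e) then PySem.Set.add s f else s) s1
      d.insert e s2) PySem.Dict.empty
      = el.foldl (fun d e => d.insert e (pvVal el e)) PySem.Dict.empty := by
    apply PySem.List.foldl_congr_mem
    intro acc x _
    show acc.insert x _ = _
    rw [pv_valB_eq]
  rw [hB, pv_dict_insert_items]

-- ===== VERDICT (by name: the statement is the Claim_ definition above) =====
theorem get_element_neighbors_spec : Claim_equal_get_element_neighbors := by
  intro el _
  unfold Spec_get_element_neighbors
  exact pv_main el
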